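-- pv_equiv track=rewrite | github.com/thierryxdp/TCC | problems/833/solution_382671.py | conta_numero
-- ===== SOURCE A (Python) =====
-- def conta_numero(numero, matriz):
--     ''''''
--     resultado = 0
--     linhas = len(matriz)
--     colunas = len(matriz[0])
--     for i in range(linhas):
--         if numero in matriz[i][:]:
--             resultado += matriz[i].count(numero)
--         else:
--             return 0
--     return resultado
-- ===== SOURCE B (Python) =====
-- def conta_numero(numero, matriz):
--     if any(numero not in linha for linha in matriz):
--         return 0
--     plana = []
--     for linha in matriz:
--         plana.extend(linha)
--     return plana.count(numero)
-- ===== Notes on version B (the rewrite author's own statement) =====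
-- stated objective: simpler
-- what changed: A interleaves per-row counting with an early return 0; B never counts per row: it first checks membership in every row (returning 0 if any row lacks the number), then flattens the whole matrix into one list and performs a single global count on it.
import Mathlib
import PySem

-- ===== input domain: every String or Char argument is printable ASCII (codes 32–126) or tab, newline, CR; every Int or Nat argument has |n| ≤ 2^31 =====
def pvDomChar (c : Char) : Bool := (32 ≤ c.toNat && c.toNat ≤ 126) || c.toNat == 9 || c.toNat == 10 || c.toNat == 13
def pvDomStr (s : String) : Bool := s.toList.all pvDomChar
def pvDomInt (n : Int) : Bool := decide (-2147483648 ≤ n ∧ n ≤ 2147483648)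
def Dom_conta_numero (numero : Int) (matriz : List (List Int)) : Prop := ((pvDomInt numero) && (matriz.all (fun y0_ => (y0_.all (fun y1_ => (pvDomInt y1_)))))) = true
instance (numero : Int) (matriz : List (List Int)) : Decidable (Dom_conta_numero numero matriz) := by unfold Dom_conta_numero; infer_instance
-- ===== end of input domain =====

-- B replaces A's interleaved per-row counting with a membership pass over the rows
-- followed by one global count on the flattened matrix (simpler two-phase structure).

-- ===== PORT A =====
-- the 'for i in range(linhas)' loop with its early 'return 0', as structural
-- recursion over the rows carrying 'resultado'
def contaLoopA (numero : Int) : List (List Int) → Int → Int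
  | [], resultado => resultado
  | linha :: resto, resultado =>
      if numero ∈ PySem.List.slice linha none none then
        contaLoopA numero resto (resultado + (PySem.List.count linha numero : Int))
      else 0

def conta_numero (numero : Int) (matriz : List (List Int)) : Int :=
  let resultado : Int := 0
  let _linhas := matriz.length
  let _colunas := ((PySem.List.pyGet? matriz 0).getD []).length  -- len(matriz[0]); Pre_ guarantees matriz ≠ [] (IndexError otherwise)
  contaLoopA numero matriz resultado

-- ===== PORT B =====
-- the 'for linha in matriz: plana.extend(linha)' loop of Source B
def flattenLoopB : List (List Int) → List Int → List Int
  | [], plana => plana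
  | linha :: resto, plana => flattenLoopB resto (plana ++ linha)

def conta_numero_alt (numero : Int) (matriz : List (List Int)) : Int :=
  if matriz.any (fun linha => !(linha.contains numero)) then 0
  else (PySem.List.count (flattenLoopB matriz []) numero : Int)

-- ===== PRECONDITION & SPEC =====
-- A raises IndexError on the empty matrix (it reads matriz[0]); excluded here.
def Pre_conta_numero (numero : Int) (matriz : List (List Int)) : Prop := matriz ≠ []
instance (numero : Int) (matriz : List (List Int)) : Decidable (Pre_conta_numero numero matriz) := by unfold Pre_conta_numero; infer_instance
def pvWitness_conta_numero : Int × List (List Int) := (2, [[1, 2], [2, 2]])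

def Spec_conta_numero (numero : Int) (matriz : List (List Int)) (out : Int) : Prop := out = conta_numero_alt numero matriz
instance (numero : Int) (matriz : List (List Int)) (out : Int) : Decidable (Spec_conta_numero numero matriz out) := by unfold Spec_conta_numero; infer_instance

-- ===== CLAIM =====
def Claim_equal_conta_numero : Prop := ∀ (numero : Int) (matriz : List (List Int)), Dom_conta_numero numero matriz → Pre_conta_numero numero matriz → Spec_conta_numero numero matriz (conta_numero numero matriz)

-- ===== LEMMAS AND PROOFS =====
-- B's flatten loop produces acc ++ concatenation of the rows
theorem flattenLoopB_eq : ∀ (rs : List (List Int)) (acc : List Int),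
    flattenLoopB rs acc = acc ++ rs.flatten := by
  intro rs
  induction rs with
  | nil => intro acc; simp [flattenLoopB]
  | cons r rest ih => intro acc; simp [flattenLoopB, ih]

-- loop invariant for A: 0 if some remaining row lacks numero, else acc + count over the flattened rest
theorem contaLoopA_eq (numero : Int) : ∀ (rs : List (List Int)) (acc : Int),
    contaLoopA numero rs acc =
      if rs.any (fun linha => !(linha.contains numero)) then 0
      else acc + (List.count numero rs.flatten : Int) := by
  intro rs
  induction rs with
  | nil => intro acc; simp [contaLoopA]
  | cons r rest ih =>
      intro acc
      simp only [contaLoopA, PySem.List.slice_none_none, List.any_cons, List.flatten_cons,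
        List.count_append]
      by_cases h : numero ∈ r
      · rw [if_pos h, ih]
        simp only [List.contains_iff_mem.mpr h, Bool.not_true, Bool.false_or]
        split_ifs with h2
        · rfl
        · rw [PySem.List.count_eq]
          push_cast
          ring
      · rw [if_neg h, if_pos (by simp; exact Or.inl h)]

-- ===== VERDICT =====
theorem conta_numero_spec : Claim_equal_conta_numero := by
  intro numero matriz _ _
  show contaLoopA numero matriz 0 = _
  rw [contaLoopA_eq]
  simp [conta_numero_alt, flattenLoopB_eq, PySem.List.count_eq]
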